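-- pv_equiv track=rewrite | github.com/akhandsingh17/assignments | leetcode/LeetCode611.py | LeetCode611
-- ===== SOURCE A (Python) =====
-- import collections
--
-- def LeetCode611(ary):
--
--     dict=collections.Counter(ary)
--
--     lst=[]
--     cnt=[]
--
--     for key,val in dict.items():
--         lst.append(key)
--         cnt.append(val)
--
--     fnl_lst=[]
--     tmp=[]
--
--     Combinations_recur(lst,cnt,fnl_lst,tmp)
--
--     return fnl_lst
--
-- def Combinations_recur(lst,cnt,fnl_lst,tmp):
--
--     if len(tmp)==3:
--
--         a=tmp[0]
--         b=tmp[1]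
--         c=tmp[2]
--         if a+b>c and a+c>b and b+c>a:
--             if sorted(tmp) not in fnl_lst:
--                 fnl_lst.append(sorted(tmp.copy()))
--
--     for i in range(0,len(lst)):
--         if cnt[i]==0:
--             continue
--         tmp.append(lst[i])
--         cnt[i]=cnt[i]-1
--         Combinations_recur(lst,cnt, fnl_lst, tmp)
--         tmp.pop()
--         cnt[i]=cnt[i]+1
-- ===== SOURCE B (Python) =====
-- import collections
--
-- def LeetCode611(ary):
--     # Enumerate each distinct-value triple once (counts-aware), in the order
--     # of first occurrence of the values; no dedup list is ever scanned.
--     cnt = collections.Counter(ary)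
--     keys = list(cnt)
--     m = len(keys)
--     res = []
--     for i in range(m):
--         for j in range(i, m):
--             for k in range(j, m):
--                 if i == k and cnt[keys[i]] < 3:
--                     continue
--                 if i < k and i == j and cnt[keys[i]] < 2:
--                     continue
--                 if i < k and j == k and cnt[keys[k]] < 2:
--                     continue
--                 x, y, z = keys[i], keys[j], keys[k]
--                 if x + y > z and x + z > y and y + z > x:
--                     res.append(sorted([x, y, z]))
--     return res
-- ===== Notes on version B (the rewrite author's own statement) =====
-- stated objective: faster
-- what changed: A DFS-enumerates every multiset-permutation sequence over the array's full multiset (all lengths, factorial blow-up) and dedups triples by scanning the result list; B enumerates each index triple i<=j<=k over the distinct values exactly once with a multiplicity check, so no dedup scan is needed; intended as faster (asymptotic) - a timing run saw A time out at n=16 where B returned, but could not measure a clean ratio at sizes where A finishes.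
import Mathlib
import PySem

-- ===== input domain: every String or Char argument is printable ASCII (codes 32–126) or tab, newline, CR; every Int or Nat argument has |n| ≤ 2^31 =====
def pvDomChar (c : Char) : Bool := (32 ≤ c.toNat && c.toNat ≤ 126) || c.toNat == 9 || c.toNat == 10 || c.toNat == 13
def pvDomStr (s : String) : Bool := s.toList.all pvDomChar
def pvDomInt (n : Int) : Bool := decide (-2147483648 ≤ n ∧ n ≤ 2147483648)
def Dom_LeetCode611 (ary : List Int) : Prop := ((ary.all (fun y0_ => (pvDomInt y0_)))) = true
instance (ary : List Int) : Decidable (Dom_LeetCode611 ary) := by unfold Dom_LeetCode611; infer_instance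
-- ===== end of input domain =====

-- B replaces A's factorial DFS over every multiset-permutation sequence (with a membership-scan dedup)
-- by a single counts-aware enumeration of each index triple i ≤ j ≤ k over the distinct values; exact same output.

-- ===== PORT A =====
-- Counts are kept as Nat (Counter values are the positive multiplicities), so the
-- recursion's termination measure is the total remaining count, a Nat sum.
theorem lc611_sum_set_lt (cnt : List Nat) (i : Nat) (h : ¬ cnt.getD i 0 = 0) :
    (cnt.set i (cnt.getD i 0 - 1)).sum < cnt.sum := by
  have hi : i < cnt.length := by
    by_contra hle
    apply h
    have hle' : cnt.length ≤ i := by omega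
    simp [List.getD_eq_getElem?_getD, List.getElem?_eq_none hle']
  have h1 : cnt.getD i 0 = cnt[i] := by
    simp [List.getD_eq_getElem?_getD, List.getElem?_eq_getElem hi]
  have h2 := List.sum_take_add_sum_drop cnt i
  rw [List.drop_eq_getElem_cons hi] at h2
  have h3 := List.sum_set cnt i (cnt.getD i 0 - 1)
  simp only [List.sum_cons] at h2
  rw [h3, if_pos hi]
  have : (List.take i cnt).sum + (List.drop (i + 1) cnt).sum + cnt[i] = cnt.sum := by omega
  omega

-- the body of Python's `if len(tmp)==3:` block (triangle test + dedup append)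
def lc611_check (tmp : List Int) (fnl : List (List Int)) : List (List Int) :=
  match tmp with
  | [a, b, c] =>
    if a + b > c ∧ a + c > b ∧ b + c > a then
      if PySem.List.sorted tmp (fun x => x) ∈ fnl then fnl
      else fnl ++ [PySem.List.sorted tmp (fun x => x)]
    else fnl
  | _ => fnl

mutual
-- Combinations_recur: emit at depth 3, then the `for i in range(len(lst))` loop
def lc611_combRec (lst : List Int) (cnt : List Nat) (fnl : List (List Int))
    (tmp : List Int) : List (List Int) :=
  let fnl' := if tmp.length = 3 then lc611_check tmp fnl else fnl
  lc611_combLoop lst cnt fnl' tmp 0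
  termination_by (cnt.sum, 1, 0)
  decreasing_by exact Prod.Lex.right _ (Prod.Lex.left _ _ (by omega))

def lc611_combLoop (lst : List Int) (cnt : List Nat) (fnl : List (List Int))
    (tmp : List Int) (i : Nat) : List (List Int) :=
  if hi : i < lst.length then
    let fnl' :=
      if hc : cnt.getD i 0 = 0 then fnl
      else lc611_combRec lst (cnt.set i (cnt.getD i 0 - 1)) fnl (tmp ++ [lst.getD i 0])
    lc611_combLoop lst cnt fnl' tmp (i + 1)
  else fnl
  termination_by (cnt.sum, 0, lst.length - i)
  decreasing_by
  · exact Prod.Lex.left _ _ (lc611_sum_set_lt cnt i hc)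
  · exact Prod.Lex.right _ (Prod.Lex.right _ (by omega))
end

def LeetCode611 (ary : List Int) : List (List Int) :=
  let d := PySem.Dict.counter ary
  let lst := d.keys
  let cnt := d.values.map Int.toNat
  lc611_combRec lst cnt [] []

-- ===== PORT B =====
def LeetCode611_alt (ary : List Int) : List (List Int) :=
  let d := PySem.Dict.counter ary
  let keys := d.keys
  let m := keys.length
  (List.range m).foldl (fun res i =>
    (List.range' i (m - i)).foldl (fun res j =>
      (List.range' j (m - j)).foldl (fun res k =>
        if i = k ∧ d.getD (keys.getD i 0) 0 < 3 then res
        else if i < k ∧ i = j ∧ d.getD (keys.getD i 0) 0 < 2 then res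
        else if i < k ∧ j = k ∧ d.getD (keys.getD k 0) 0 < 2 then res
        else
          let x := keys.getD i 0
          let y := keys.getD j 0
          let z := keys.getD k 0
          if x + y > z ∧ x + z > y ∧ y + z > x then
            res ++ [PySem.List.sorted [x, y, z] (fun t => t)]
          else res) res) res) []

-- ===== PRECONDITION & SPEC =====
def Spec_LeetCode611 (ary : List Int) (out : List (List Int)) : Prop := out = LeetCode611_alt ary
instance (ary : List Int) (out : List (List Int)) : Decidable (Spec_LeetCode611 ary out) := by unfold Spec_LeetCode611; infer_instance

-- ===== CLAIM (what is proved, stated in full; the proofs are below) =====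
def Claim_equal_LeetCode611 : Prop := ∀ (ary : List Int), Dom_LeetCode611 ary → Spec_LeetCode611 ary (LeetCode611 ary)

-- ===== LEMMAS AND PROOFS =====

-- proof-side vocabulary
def lcKey (keys : List Int) (t : Nat) : Int := keys.getD t 0
def lcL (q : Nat × Nat × Nat) : List Nat := [q.1, q.2.1, q.2.2]
def lcTriples (m : Nat) : List (Nat × Nat × Nat) :=
  (List.range m).flatMap fun i => (List.range m).flatMap fun j => (List.range m).map fun k => (i, j, k)
abbrev lcTri (keys : List Int) (q : Nat × Nat × Nat) : Prop :=
  lcKey keys q.1 + lcKey keys q.2.1 > lcKey keys q.2.2 ∧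
  lcKey keys q.1 + lcKey keys q.2.2 > lcKey keys q.2.1 ∧
  lcKey keys q.2.1 + lcKey keys q.2.2 > lcKey keys q.1
abbrev lcFeas (keys : List Int) (c : Int → Nat) (q : Nat × Nat × Nat) : Prop :=
  ∀ t ∈ lcL q, (lcL q).count t ≤ c (lcKey keys t)
def lcGood (keys : List Int) (c : Int → Nat) (q : Nat × Nat × Nat) : Bool :=
  decide (q.1 ≤ q.2.1 ∧ q.2.1 ≤ q.2.2 ∧ lcFeas keys c q ∧ lcTri keys q)
def lcVals (keys : List Int) (q : Nat × Nat × Nat) : List Int :=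
  PySem.List.sorted [lcKey keys q.1, lcKey keys q.2.1, lcKey keys q.2.2] (fun x => x)
abbrev lcChain (cnt : List Nat) (q : Nat × Nat × Nat) : Prop :=
  ¬ cnt.getD q.1 0 = 0 ∧
  (let c1 := cnt.set q.1 (cnt.getD q.1 0 - 1)
   ¬ c1.getD q.2.1 0 = 0 ∧
   (let c2 := c1.set q.2.1 (c1.getD q.2.1 0 - 1)
    ¬ c2.getD q.2.2 0 = 0))
def lcCntL (keys : List Int) (c : Int → Nat) : List Nat := keys.map c
def lcStepA (keys : List Int) (c : Int → Nat) (fnl : List (List Int)) (q : Nat × Nat × Nat) :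
    List (List Int) :=
  if lcChain (lcCntL keys c) q then
    lc611_check [lcKey keys q.1, lcKey keys q.2.1, lcKey keys q.2.2] fnl
  else fnl
def lcLex (q q' : Nat × Nat × Nat) : Prop :=
  q.1 < q'.1 ∨ (q.1 = q'.1 ∧ (q.2.1 < q'.2.1 ∨ (q.2.1 = q'.2.1 ∧ q.2.2 < q'.2.2)))
def lcSort3 (q : Nat × Nat × Nat) : Nat × Nat × Nat :=
  if q.1 ≤ q.2.1 then
    if q.2.1 ≤ q.2.2 then q
    else if q.1 ≤ q.2.2 then (q.1, q.2.2, q.2.1) else (q.2.2, q.1, q.2.1)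
  else
    if q.1 ≤ q.2.2 then (q.2.1, q.1, q.2.2)
    else if q.2.1 ≤ q.2.2 then (q.2.1, q.2.2, q.1) else (q.2.2, q.2.1, q.1)

theorem lc611_getD_le_sum (cnt : List Nat) (j : Nat) : cnt.getD j 0 ≤ cnt.sum := by
  rcases Nat.lt_or_ge j cnt.length with hj | hj
  · have h : cnt.getD j 0 = cnt[j] := by
      simp [List.getD_eq_getElem?_getD, List.getElem?_eq_getElem hj]
    rw [h]
    exact List.single_le_sum (fun x _ => Nat.zero_le x) _ (List.getElem_mem hj)
  · simp [List.getD_eq_getElem?_getD, List.getElem?_eq_none hj]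

theorem lc611_getD_set (l : List Nat) (i j v : Nat) (hi : i < l.length) :
    (l.set i v).getD j 0 = if i = j then v else l.getD j 0 := by
  simp only [List.getD_eq_getElem?_getD, List.getElem?_set]
  by_cases h : i = j
  · subst h
    simp [hi]
  · simp [h]

theorem lc611_combLoop_eq_foldl (lst : List Int) (cnt : List Nat) (fnl : List (List Int))
    (tmp : List Int) (i : Nat) :
    lc611_combLoop lst cnt fnl tmp i =
      (List.range' i (lst.length - i)).foldl
        (fun f j => if cnt.getD j 0 = 0 then f
          else lc611_combRec lst (cnt.set j (cnt.getD j 0 - 1)) f (tmp ++ [lst.getD j 0])) fnl := by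
  suffices H : ∀ (n i : Nat) (fnl : List (List Int)), lst.length - i = n →
      lc611_combLoop lst cnt fnl tmp i =
        (List.range' i (lst.length - i)).foldl
          (fun f j => if cnt.getD j 0 = 0 then f
            else lc611_combRec lst (cnt.set j (cnt.getD j 0 - 1)) f (tmp ++ [lst.getD j 0])) fnl by
    exact H _ i fnl rfl
  intro n
  induction n with
  | zero =>
    intro i fnl h
    rw [lc611_combLoop, dif_neg (by omega), h]
    rfl
  | succ n ih =>
    intro i fnl h
    rw [lc611_combLoop, dif_pos (by omega), h, List.range'_succ, List.foldl_cons]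
    simp only [dite_eq_ite]
    rw [ih (i + 1) _ (by omega), (by omega : lst.length - (i + 1) = n)]

theorem lc611_deep_id (n : Nat) : ∀ (cnt : List Nat), cnt.sum ≤ n →
    ∀ (lst : List Int) (fnl : List (List Int)) (tmp : List Int), 4 ≤ tmp.length →
      lc611_combRec lst cnt fnl tmp = fnl := by
  induction n with
  | zero =>
    intro cnt hsum lst fnl tmp htmp
    rw [lc611_combRec]
    simp only [if_neg (by omega : ¬ tmp.length = 3)]
    rw [lc611_combLoop_eq_foldl,
      PySem.List.foldl_congr_mem _ _ (fun f _ => f) _ ?_, PySem.List.foldl_ignore]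
    intro acc x _
    have hz : cnt.getD x 0 = 0 := by have := lc611_getD_le_sum cnt x; omega
    rw [if_pos hz]
  | succ n ih =>
    intro cnt hsum lst fnl tmp htmp
    rw [lc611_combRec]
    simp only [if_neg (by omega : ¬ tmp.length = 3)]
    rw [lc611_combLoop_eq_foldl,
      PySem.List.foldl_congr_mem _ _ (fun f _ => f) _ ?_, PySem.List.foldl_ignore]
    intro acc x _
    by_cases hz : cnt.getD x 0 = 0
    · rw [if_pos hz]
    · rw [if_neg hz]
      exact ih _ (by have := lc611_sum_set_lt cnt x hz; omega) _ _ _ (by simp; omega)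

theorem lc611_depth3 (lst : List Int) (cnt : List Nat) (fnl : List (List Int)) (tmp : List Int)
    (h : tmp.length = 3) : lc611_combRec lst cnt fnl tmp = lc611_check tmp fnl := by
  rw [lc611_combRec]
  simp only [if_pos h]
  rw [lc611_combLoop_eq_foldl,
    PySem.List.foldl_congr_mem _ _ (fun f _ => f) _ ?_, PySem.List.foldl_ignore]
  intro acc x _
  by_cases hz : cnt.getD x 0 = 0
  · rw [if_pos hz]
  · rw [if_neg hz]
    exact lc611_deep_id _ _ (Nat.le_refl _) _ _ _ (by simp [h])

theorem lc611_A_eq_tripleFold (keys : List Int) (c : Int → Nat) :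
    lc611_combRec keys (lcCntL keys c) [] [] =
      (lcTriples keys.length).foldl (lcStepA keys c) [] := by
  simp only [lcTriples, List.foldl_flatMap, List.foldl_map]
  rw [lc611_combRec]
  simp only [if_neg (show ¬ ([] : List Int).length = 3 by simp)]
  rw [lc611_combLoop_eq_foldl]
  simp only [Nat.sub_zero, List.nil_append]
  rw [← List.range_eq_range']
  apply PySem.List.foldl_congr_mem
  intro f i _
  by_cases h0 : (lcCntL keys c).getD i 0 = 0
  · rw [if_pos h0]
    symm
    rw [PySem.List.foldl_congr_mem _ _ (fun f _ => f) _ ?_, PySem.List.foldl_ignore]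
    intro acc j _
    rw [PySem.List.foldl_congr_mem _ _ (fun f _ => f) _ ?_, PySem.List.foldl_ignore]
    intro acc' k _
    simp only [lcStepA]
    rw [if_neg]
    intro hch
    exact hch.1 h0
  · rw [if_neg h0]
    rw [lc611_combRec]
    simp only [if_neg (show ¬ ([keys.getD i 0] : List Int).length = 3 by simp)]
    rw [lc611_combLoop_eq_foldl]
    simp only [Nat.sub_zero, List.singleton_append, List.cons_append, List.nil_append]
    rw [← List.range_eq_range']
    apply PySem.List.foldl_congr_mem
    intro f1 j _
    by_cases h1 : ((lcCntL keys c).set i ((lcCntL keys c).getD i 0 - 1)).getD j 0 = 0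
    · rw [if_pos h1]
      symm
      rw [PySem.List.foldl_congr_mem _ _ (fun f _ => f) _ ?_, PySem.List.foldl_ignore]
      intro acc k _
      simp only [lcStepA]
      rw [if_neg]
      intro hch
      exact hch.2.1 h1
    · rw [if_neg h1]
      rw [lc611_combRec]
      simp only [if_neg (show ¬ ([keys.getD i 0, keys.getD j 0] : List Int).length = 3 by simp)]
      rw [lc611_combLoop_eq_foldl]
      simp only [Nat.sub_zero, List.cons_append, List.nil_append]
      rw [← List.range_eq_range']
      apply PySem.List.foldl_congr_mem
      intro f2 k _
      by_cases h2 : (((lcCntL keys c).set i ((lcCntL keys c).getD i 0 - 1)).set j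
          (((lcCntL keys c).set i ((lcCntL keys c).getD i 0 - 1)).getD j 0 - 1)).getD k 0 = 0
      · rw [if_pos h2]
        simp only [lcStepA]
        rw [if_neg]
        intro hch
        exact hch.2.2 h2
      · rw [if_neg h2]
        rw [lc611_depth3 _ _ _ _ (by simp)]
        simp only [lcStepA]
        rw [if_pos ⟨h0, h1, h2⟩]
        rfl

theorem lc611_mem_triples (m : Nat) (q : Nat × Nat × Nat) :
    q ∈ lcTriples m ↔ q.1 < m ∧ q.2.1 < m ∧ q.2.2 < m := by
  obtain ⟨i, j, k⟩ := q
  simp only [lcTriples, List.mem_flatMap, List.mem_map, List.mem_range]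
  constructor
  · rintro ⟨a, ha, b, hb, c, hc, heq⟩
    obtain ⟨rfl, rfl, rfl⟩ : a = i ∧ b = j ∧ c = k := by
      simpa [Prod.ext_iff] using heq
    exact ⟨ha, hb, hc⟩
  · rintro ⟨h1, h2, h3⟩
    exact ⟨i, h1, j, h2, k, h3, rfl⟩

theorem lc611_triples_pairwise (m : Nat) : (lcTriples m).Pairwise lcLex := by
  unfold lcTriples
  rw [List.pairwise_flatMap]
  constructor
  · intro i _
    rw [List.pairwise_flatMap]
    constructor
    · intro j _
      rw [List.pairwise_map]
      exact List.pairwise_lt_range.imp fun h => by simp [lcLex]; omega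
    · apply List.pairwise_lt_range.imp
      intro j j' hjj x hx y hy
      simp only [List.mem_map, List.mem_range] at hx hy
      obtain ⟨k, _, rfl⟩ := hx
      obtain ⟨k', _, rfl⟩ := hy
      simp [lcLex]; omega
  · apply List.pairwise_lt_range.imp
    intro i i' hii x hx y hy
    simp only [List.mem_flatMap, List.mem_map, List.mem_range] at hx hy
    obtain ⟨j, _, k, _, rfl⟩ := hx
    obtain ⟨j', _, k', _, rfl⟩ := hy
    simp [lcLex]; omega

theorem lc611_triples_nodup (m : Nat) : (lcTriples m).Nodup := by
  apply (lc611_triples_pairwise m).imp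
  intro a b hab
  rintro rfl
  simp only [lcLex] at hab
  omega

theorem lc611_chain_iff (keys : List Int) (c : Int → Nat)
    (hpos : ∀ t, t < keys.length → 1 ≤ c (lcKey keys t)) (q : Nat × Nat × Nat)
    (h1 : q.1 < keys.length) (h2 : q.2.1 < keys.length) (h3 : q.2.2 < keys.length) :
    lcChain (lcCntL keys c) q ↔ lcFeas keys c q := by
  obtain ⟨i, j, k⟩ := q
  dsimp only at h1 h2 h3
  have hlen0 : (lcCntL keys c).length = keys.length := by simp [lcCntL]
  have e0 : ∀ t, t < keys.length → (lcCntL keys c).getD t 0 = c (lcKey keys t) := by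
    intro t ht
    simp [lcCntL, lcKey, List.getD_eq_getElem?_getD, List.getElem?_map,
      List.getElem?_eq_getElem ht]
  have HF : lcFeas keys c (i, j, k) ↔
      ((([i, j, k] : List Nat).count i ≤ c (lcKey keys i)) ∧
       (([i, j, k] : List Nat).count j ≤ c (lcKey keys j)) ∧
       (([i, j, k] : List Nat).count k ≤ c (lcKey keys k))) := by
    simp [lcFeas, lcL]
  have pi := hpos i h1
  have pj := hpos j h2
  have pk := hpos k h3
  unfold lcChain
  dsimp only
  rw [lc611_getD_set _ i j _ (by omega),
      lc611_getD_set _ j k _ (by rw [List.length_set]; omega),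
      lc611_getD_set _ i k _ (by omega),
      e0 i h1, e0 j h2, e0 k h3, HF]
  simp only [List.count_cons, List.count_nil, beq_iff_eq, if_true]
  split_ifs <;> (try subst_vars) <;> omega

theorem lc611_sort3_spec (q : Nat × Nat × Nat) :
    (lcSort3 q).1 ≤ (lcSort3 q).2.1 ∧ (lcSort3 q).2.1 ≤ (lcSort3 q).2.2 ∧
      (lcL (lcSort3 q)).Perm (lcL q) := by
  obtain ⟨i, j, k⟩ := q
  simp only [lcSort3]
  split_ifs <;>
    refine ⟨by dsimp only; omega, by dsimp only; omega, List.perm_iff_count.mpr fun a => ?_⟩ <;>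
    simp only [lcL, List.count_cons, List.count_nil] <;> (try split_ifs) <;> omega

theorem lc611_sort3_lex (q : Nat × Nat × Nat) (h : ¬ (q.1 ≤ q.2.1 ∧ q.2.1 ≤ q.2.2)) :
    lcLex (lcSort3 q) q := by
  obtain ⟨i, j, k⟩ := q
  simp only [lcSort3, lcLex] at *
  split_ifs <;> dsimp only <;> omega

theorem lc611_vals_perm (keys : List Int) (q q' : Nat × Nat × Nat)
    (h : (lcL q).Perm (lcL q')) : lcVals keys q = lcVals keys q' := by
  apply (PySem.List.sorted_id_eq_sorted_id_iff_perm _ _).mpr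
  have h2 := h.map (lcKey keys)
  simpa [lcL] using h2

theorem lc611_feas_perm (keys : List Int) (c : Int → Nat) (q q' : Nat × Nat × Nat)
    (h : (lcL q).Perm (lcL q')) : lcFeas keys c q ↔ lcFeas keys c q' := by
  constructor
  · intro hf t ht
    rw [← h.count_eq]
    exact hf t (h.mem_iff.mpr ht)
  · intro hf t ht
    rw [h.count_eq]
    exact hf t (h.mem_iff.mp ht)

theorem lc611_tri_sort3 (keys : List Int) (q : Nat × Nat × Nat) :
    lcTri keys (lcSort3 q) ↔ lcTri keys q := by
  obtain ⟨i, j, k⟩ := q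
  simp only [lcSort3]
  split_ifs <;> simp only [lcTri] <;> constructor <;> intro h <;>
    exact ⟨by omega, by omega, by omega⟩

theorem lc611_key_inj (keys : List Int) (hnd : keys.Nodup) (s t : Nat)
    (hs : s < keys.length) (ht : t < keys.length) (h : lcKey keys s = lcKey keys t) : s = t := by
  have es : lcKey keys s = keys[s] := by
    simp [lcKey, List.getD_eq_getElem?_getD, List.getElem?_eq_getElem hs]
  have et : lcKey keys t = keys[t] := by
    simp [lcKey, List.getD_eq_getElem?_getD, List.getElem?_eq_getElem ht]
  rw [es, et] at h
  exact (hnd.getElem_inj_iff).mp h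

theorem lc611_count3 (keys : List Int) (hnd : keys.Nodup) (a i j k : Nat)
    (ha : a < keys.length) (hi : i < keys.length) (hj : j < keys.length)
    (hk : k < keys.length) :
    List.count (lcKey keys a) [lcKey keys i, lcKey keys j, lcKey keys k]
      = List.count a ([i, j, k] : List Nat) := by
  have Ei : (lcKey keys i = lcKey keys a) ↔ (i = a) :=
    ⟨fun h => lc611_key_inj keys hnd i a hi ha h, fun h => by rw [h]⟩
  have Ej : (lcKey keys j = lcKey keys a) ↔ (j = a) :=
    ⟨fun h => lc611_key_inj keys hnd j a hj ha h, fun h => by rw [h]⟩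
  have Ek : (lcKey keys k = lcKey keys a) ↔ (k = a) :=
    ⟨fun h => lc611_key_inj keys hnd k a hk ha h, fun h => by rw [h]⟩
  simp only [List.count_cons, List.count_nil, beq_iff_eq, Ei, Ej, Ek]

theorem lc611_vals_inj (keys : List Int) (hnd : keys.Nodup) (q q' : Nat × Nat × Nat)
    (hq1 : q.1 < keys.length) (hq2 : q.2.1 < keys.length) (hq3 : q.2.2 < keys.length)
    (hq1' : q'.1 < keys.length) (hq2' : q'.2.1 < keys.length) (hq3' : q'.2.2 < keys.length)
    (hs : q.1 ≤ q.2.1 ∧ q.2.1 ≤ q.2.2) (hs' : q'.1 ≤ q'.2.1 ∧ q'.2.1 ≤ q'.2.2)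
    (h : lcVals keys q = lcVals keys q') : q = q' := by
  obtain ⟨i, j, k⟩ := q
  obtain ⟨i', j', k'⟩ := q'
  have hs1 : i ≤ j := hs.1
  have hs2 : j ≤ k := hs.2
  have hs1' : i' ≤ j' := hs'.1
  have hs2' : j' ≤ k' := hs'.2
  simp only [lcVals] at h
  have hp := (PySem.List.sorted_id_eq_sorted_id_iff_perm _ _).mp h
  have hperm : ([i, j, k] : List Nat).Perm [i', j', k'] := by
    rw [List.perm_iff_count]
    intro a
    by_cases hmem : a ∈ ([i, j, k] : List Nat)
    · have ha : a < keys.length := by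
        simp only [List.mem_cons, List.not_mem_nil, or_false] at hmem
        rcases hmem with rfl | rfl | rfl <;> assumption
      rw [← lc611_count3 keys hnd a i j k ha hq1 hq2 hq3,
        ← lc611_count3 keys hnd a i' j' k' ha hq1' hq2' hq3', hp.count_eq]
    · by_cases hmem' : a ∈ ([i', j', k'] : List Nat)
      · have ha : a < keys.length := by
          simp only [List.mem_cons, List.not_mem_nil, or_false] at hmem'
          rcases hmem' with rfl | rfl | rfl <;> assumption
        rw [← lc611_count3 keys hnd a i j k ha hq1 hq2 hq3,
          ← lc611_count3 keys hnd a i' j' k' ha hq1' hq2' hq3', hp.count_eq]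
      · rw [List.count_eq_zero_of_not_mem hmem, List.count_eq_zero_of_not_mem hmem']
  have heq : ([i, j, k] : List Nat) = [i', j', k'] := by
    refine List.Perm.eq_of_pairwise (le := (· ≤ ·))
      (fun a b _ _ hab hba => Nat.le_antisymm hab hba) ?_ ?_ hperm
    · simp only [List.pairwise_cons, List.mem_cons, List.not_mem_nil, or_false,
        List.Pairwise.nil, and_true]
      constructor
      · rintro a (rfl | rfl) <;> omega
      · constructor
        · rintro a rfl; omega
        · simp
    · simp only [List.pairwise_cons, List.mem_cons, List.not_mem_nil, or_false,
        List.Pairwise.nil, and_true]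
      constructor
      · rintro a (rfl | rfl) <;> omega
      · constructor
        · rintro a rfl; omega
        · simp
  simp only [List.cons.injEq, and_true] at heq
  obtain ⟨rfl, rfl, rfl⟩ := heq
  rfl

theorem lc611_main (keys : List Int) (c : Int → Nat) (hnd : keys.Nodup)
    (hpos : ∀ t, t < keys.length → 1 ≤ c (lcKey keys t)) :
    ∀ (ts done : List (Nat × Nat × Nat)), lcTriples keys.length = done ++ ts →
      ts.foldl (lcStepA keys c) ((done.filter (lcGood keys c)).map (lcVals keys))
        = ((done ++ ts).filter (lcGood keys c)).map (lcVals keys) := by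
  intro ts
  induction ts with
  | nil => intro done h; simp
  | cons q ts ih =>
    intro done hsplit
    have hq : q ∈ lcTriples keys.length := by rw [hsplit]; simp
    obtain ⟨hb1, hb2, hb3⟩ := (lc611_mem_triples _ q).mp hq
    have hnodupT := lc611_triples_nodup keys.length
    rw [hsplit] at hnodupT
    have hqnotdone : q ∉ done := by
      intro hmem
      rcases List.nodup_append.mp hnodupT with ⟨_, _, hdisj⟩
      exact hdisj q hmem q (by simp) rfl
    have step : lcStepA keys c ((done.filter (lcGood keys c)).map (lcVals keys)) q
        = ((done ++ [q]).filter (lcGood keys c)).map (lcVals keys) := by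
      rw [List.filter_append, List.map_append]
      by_cases hch : lcChain (lcCntL keys c) q
      · have hfe : lcFeas keys c q := (lc611_chain_iff keys c hpos q hb1 hb2 hb3).mp hch
        rw [lcStepA, if_pos hch]
        by_cases htri : lcTri keys q
        · by_cases hsorted : q.1 ≤ q.2.1 ∧ q.2.1 ≤ q.2.2
          · have hgood : lcGood keys c q = true := by
              simp only [lcGood, decide_eq_true_eq]
              exact ⟨hsorted.1, hsorted.2, hfe, htri⟩
            have hnotmem :
                lcVals keys q ∉ (done.filter (lcGood keys c)).map (lcVals keys) := by
              intro hmem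
              obtain ⟨q', hq'f, hq'v⟩ := List.mem_map.mp hmem
              obtain ⟨hq'd, hq'g⟩ := List.mem_filter.mp hq'f
              have hq'T : q' ∈ lcTriples keys.length := by
                rw [hsplit]; exact List.mem_append_left _ hq'd
              obtain ⟨hb1', hb2', hb3'⟩ := (lc611_mem_triples _ q').mp hq'T
              simp only [lcGood, decide_eq_true_eq] at hq'g
              have : q' = q :=
                lc611_vals_inj keys hnd q' q hb1' hb2' hb3' hb1 hb2 hb3
                  ⟨hq'g.1, hq'g.2.1⟩ hsorted hq'v
              exact hqnotdone (this ▸ hq'd)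
            rw [lc611_check, if_pos htri,
              show (PySem.List.sorted [lcKey keys q.1, lcKey keys q.2.1, lcKey keys q.2.2]
                fun x => x) = lcVals keys q from rfl, if_neg hnotmem]
            simp [List.filter_cons, hgood]
          · have hgood : lcGood keys c q = false := by
              simp only [lcGood, decide_eq_false_iff_not]
              intro hcon
              exact hsorted ⟨hcon.1, hcon.2.1⟩
            have hspec := lc611_sort3_spec q
            have hlex := lc611_sort3_lex q hsorted
            have hbs : (lcSort3 q).1 < keys.length ∧ (lcSort3 q).2.1 < keys.length ∧
                (lcSort3 q).2.2 < keys.length := by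
              have m1 : (lcSort3 q).1 ∈ lcL q := hspec.2.2.mem_iff.mp (by simp [lcL])
              have m2 : (lcSort3 q).2.1 ∈ lcL q := hspec.2.2.mem_iff.mp (by simp [lcL])
              have m3 : (lcSort3 q).2.2 ∈ lcL q := hspec.2.2.mem_iff.mp (by simp [lcL])
              simp only [lcL, List.mem_cons, List.not_mem_nil, or_false] at m1 m2 m3
              refine ⟨?_, ?_, ?_⟩
              · rcases m1 with h | h | h <;> omega
              · rcases m2 with h | h | h <;> omega
              · rcases m3 with h | h | h <;> omega
            have hsT : lcSort3 q ∈ lcTriples keys.length :=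
              (lc611_mem_triples _ _).mpr hbs
            have hsdone : lcSort3 q ∈ done := by
              rw [hsplit] at hsT
              rcases List.mem_append.mp hsT with hmem | hmem
              · exact hmem
              · exfalso
                rcases List.mem_cons.mp hmem with heq | hmem'
                · rw [heq] at hlex
                  simp only [lcLex] at hlex
                  omega
                · have hpair := lc611_triples_pairwise keys.length
                  rw [hsplit] at hpair
                  rcases List.pairwise_append.mp hpair with ⟨_, hqts, _⟩
                  have := (List.pairwise_cons.mp hqts).1 _ hmem'
                  simp only [lcLex] at this hlex
                  omega
            have hsgood : lcGood keys c (lcSort3 q) = true := by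
              simp only [lcGood, decide_eq_true_eq]
              exact ⟨hspec.1, hspec.2.1,
                (lc611_feas_perm keys c _ _ hspec.2.2).mpr hfe,
                (lc611_tri_sort3 keys q).mpr htri⟩
            have hveq : lcVals keys (lcSort3 q) = lcVals keys q :=
              lc611_vals_perm keys _ _ hspec.2.2
            have hmem : lcVals keys q ∈ (done.filter (lcGood keys c)).map (lcVals keys) :=
              List.mem_map.mpr ⟨lcSort3 q, List.mem_filter.mpr ⟨hsdone, hsgood⟩, hveq⟩
            rw [lc611_check, if_pos htri,
              show (PySem.List.sorted [lcKey keys q.1, lcKey keys q.2.1, lcKey keys q.2.2]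
                fun x => x) = lcVals keys q from rfl, if_pos hmem]
            simp [List.filter_cons, hgood]
        · rw [lc611_check, if_neg htri]
          have hgood : lcGood keys c q = false := by
            simp only [lcGood, decide_eq_false_iff_not]
            intro hcon
            exact htri hcon.2.2.2
          simp [List.filter_cons, hgood]
      · have hgood : lcGood keys c q = false := by
          simp only [lcGood, decide_eq_false_iff_not]
          intro hcon
          exact hch ((lc611_chain_iff keys c hpos q hb1 hb2 hb3).mpr hcon.2.2.1)
        rw [lcStepA, if_neg hch]
        simp [List.filter_cons, hgood]
    rw [List.foldl_cons, step, ih (done ++ [q]) (by rw [hsplit]; simp)]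
    rw [List.append_assoc]
    rfl

theorem lc611_range'_filter (m j : Nat) :
    List.range' j (m - j) = (List.range m).filter (fun k => j ≤ k) := by
  induction m with
  | zero => simp
  | succ m ih =>
    rw [List.range_succ, List.filter_append]
    by_cases hj : j ≤ m
    · rw [(by omega : m + 1 - j = (m - j) + 1), List.range'_concat, ih]
      simp only [List.filter_cons, List.filter_nil]
      rw [if_pos (by simpa using hj), (by omega : j + 1 * (m - j) = m)]
    · rw [(by omega : m + 1 - j = 0)]
      have h0 : m - j = 0 := by omega
      rw [h0] at ih
      simp only [List.range'_zero] at ih ⊢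
      rw [← ih]
      simp only [List.filter_cons, List.filter_nil]
      rw [if_neg (by simpa using hj)]
      rfl

theorem lc611_feas_count (keys : List Int) (c : Int → Nat) (i j k : Nat) :
    lcFeas keys c (i, j, k) ↔
      ((([i, j, k] : List Nat).count i ≤ c (lcKey keys i)) ∧
       (([i, j, k] : List Nat).count j ≤ c (lcKey keys j)) ∧
       (([i, j, k] : List Nat).count k ≤ c (lcKey keys k))) := by
  simp [lcFeas, lcL]

theorem lc611_guard_iff (keys : List Int) (c : Int → Nat)
    (hpos : ∀ t, t < keys.length → 1 ≤ c (lcKey keys t)) (i j k : Nat)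
    (h1 : i < keys.length) (h2 : j < keys.length) (h3 : k < keys.length)
    (hij : i ≤ j) (hjk : j ≤ k) :
    (¬ (i = k ∧ (c (lcKey keys i) : Int) < 3) ∧
     ¬ (i < k ∧ i = j ∧ (c (lcKey keys i) : Int) < 2) ∧
     ¬ (i < k ∧ j = k ∧ (c (lcKey keys k) : Int) < 2)) ↔ lcFeas keys c (i, j, k) := by
  have pi := hpos i h1
  have pj := hpos j h2
  have pk := hpos k h3
  rw [lc611_feas_count]
  simp only [List.count_cons, List.count_nil, beq_iff_eq, if_true]
  split_ifs <;> (try subst_vars) <;> omega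

theorem lc611_Bstep (keys : List Int) (c : Int → Nat)
    (hpos : ∀ t, t < keys.length → 1 ≤ c (lcKey keys t)) (i j k : Nat)
    (h1 : i < keys.length) (h2 : j < keys.length) (h3 : k < keys.length)
    (hij : i ≤ j) (hjk : j ≤ k) (res : List (List Int)) :
    (if i = k ∧ (c (lcKey keys i) : Int) < 3 then res
     else if i < k ∧ i = j ∧ (c (lcKey keys i) : Int) < 2 then res
     else if i < k ∧ j = k ∧ (c (lcKey keys k) : Int) < 2 then res
     else if lcTri keys (i, j, k) then res ++ [lcVals keys (i, j, k)] else res)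
    = if lcGood keys c (i, j, k) = true then res ++ [lcVals keys (i, j, k)] else res := by
  by_cases hF : lcFeas keys c (i, j, k)
  · obtain ⟨g1, g2, g3⟩ := (lc611_guard_iff keys c hpos i j k h1 h2 h3 hij hjk).mpr hF
    rw [if_neg g1, if_neg g2, if_neg g3]
    by_cases hT : lcTri keys (i, j, k)
    · rw [if_pos hT, if_pos (by simp only [lcGood, decide_eq_true_eq]; exact ⟨hij, hjk, hF, hT⟩)]
    · rw [if_neg hT, if_neg (by simp only [lcGood, decide_eq_true_eq]; intro hcon; exact hT hcon.2.2.2)]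
  · have hgood : ¬ lcGood keys c (i, j, k) = true := by
      simp only [lcGood, decide_eq_true_eq]
      intro hcon
      exact hF hcon.2.2.1
    rw [if_neg hgood]
    have hg : ¬ (¬ (i = k ∧ (c (lcKey keys i) : Int) < 3) ∧
        ¬ (i < k ∧ i = j ∧ (c (lcKey keys i) : Int) < 2) ∧
        ¬ (i < k ∧ j = k ∧ (c (lcKey keys k) : Int) < 2)) := fun hcon =>
      hF ((lc611_guard_iff keys c hpos i j k h1 h2 h3 hij hjk).mp hcon)
    by_cases g1 : i = k ∧ (c (lcKey keys i) : Int) < 3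
    · rw [if_pos g1]
    · rw [if_neg g1]
      by_cases g2 : i < k ∧ i = j ∧ (c (lcKey keys i) : Int) < 2
      · rw [if_pos g2]
      · rw [if_neg g2]
        by_cases g3 : i < k ∧ j = k ∧ (c (lcKey keys k) : Int) < 2
        · rw [if_pos g3]
        · exact absurd ⟨g1, g2, g3⟩ hg

theorem lc611_B_eq_filterMap (ary : List Int) :
    LeetCode611_alt ary =
      ((lcTriples (PySem.Dict.counter ary).keys.length).filter
          (lcGood (PySem.Dict.counter ary).keys (fun x => ary.count x))).map
        (lcVals (PySem.Dict.counter ary).keys) := by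
  have hpos : ∀ t, t < (PySem.Dict.counter ary).keys.length →
      1 ≤ (fun x => ary.count x) (lcKey (PySem.Dict.counter ary).keys t) := by
    intro t ht
    rw [PySem.Dict.keys_counter] at ht ⊢
    have heq : lcKey (PySem.Set.ofList ary) t = (PySem.Set.ofList ary)[t] := by
      simp only [lcKey, List.getD_eq_getElem?_getD, List.getElem?_eq_getElem ht, Option.getD_some]
    rw [heq]
    exact List.count_pos_iff.mpr ((PySem.Set.mem_ofList ary _).mp (List.getElem_mem ht))
  have hRHS : ((lcTriples (PySem.Dict.counter ary).keys.length).filter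
          (lcGood (PySem.Dict.counter ary).keys (fun x => ary.count x))).map
        (lcVals (PySem.Dict.counter ary).keys)
      = (lcTriples (PySem.Dict.counter ary).keys.length).foldl
          (fun acc q => if lcGood (PySem.Dict.counter ary).keys (fun x => ary.count x) q = true
            then acc ++ [lcVals (PySem.Dict.counter ary).keys q] else acc) [] := by
    rw [PySem.List.foldl_append_if]
    simp
  rw [hRHS]
  simp only [LeetCode611_alt, lc611_range'_filter, List.foldl_filter, lcTriples,
    List.foldl_flatMap, List.foldl_map]
  apply PySem.List.foldl_congr_mem
  intro res i hi
  apply PySem.List.foldl_congr_mem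
  intro res1 j hj
  by_cases hij : i ≤ j
  · rw [if_pos (by simpa using hij)]
    apply PySem.List.foldl_congr_mem
    intro res2 k hk
    by_cases hjk : j ≤ k
    · rw [if_pos (by simpa using hjk)]
      rw [PySem.Dict.getD_counter, PySem.Dict.getD_counter]
      exact lc611_Bstep (PySem.Dict.counter ary).keys (fun x => ary.count x) hpos i j k
        (List.mem_range.mp hi) (List.mem_range.mp hj) (List.mem_range.mp hk) hij hjk res2
    · rw [if_neg (by simpa using hjk)]
      symm
      apply if_neg
      simp only [lcGood, decide_eq_true_eq]
      intro hcon
      exact hjk hcon.2.1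
  · rw [if_neg (by simpa using hij)]
    symm
    rw [PySem.List.foldl_congr_mem _ _ (fun f _ => f) _ ?_, PySem.List.foldl_ignore]
    intro acc k' _
    rw [if_neg]
    simp only [lcGood, decide_eq_true_eq]
    intro hcon
    exact hij hcon.1

-- ===== VERDICT (by name: the statement is the Claim_ definition above) =====
theorem LeetCode611_spec : Claim_equal_LeetCode611 := by
  intro ary _
  unfold Spec_LeetCode611
  have hnd : (PySem.Dict.counter ary).keys.Nodup := by
    rw [PySem.Dict.keys_counter]
    exact PySem.Set.nodup_ofList ary
  have hpos : ∀ t, t < (PySem.Dict.counter ary).keys.length →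
      1 ≤ (fun x => ary.count x) (lcKey (PySem.Dict.counter ary).keys t) := by
    intro t ht
    rw [PySem.Dict.keys_counter] at ht ⊢
    have heq : lcKey (PySem.Set.ofList ary) t = (PySem.Set.ofList ary)[t] := by
      simp only [lcKey, List.getD_eq_getElem?_getD, List.getElem?_eq_getElem ht, Option.getD_some]
    rw [heq]
    exact List.count_pos_iff.mpr ((PySem.Set.mem_ofList ary _).mp (List.getElem_mem ht))
  have hval : (PySem.Dict.counter ary).values.map Int.toNat
      = lcCntL (PySem.Dict.counter ary).keys (fun x => ary.count x) := by
    show ((PySem.Dict.counter ary).items.map (·.2)).map Int.toNat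
      = ((PySem.Dict.counter ary).items.map (·.1)).map (fun x => ary.count x)
    rw [PySem.Dict.items_counter]
    simp [List.map_map, Function.comp_def]
  simp only [LeetCode611]
  rw [hval, lc611_A_eq_tripleFold _ (fun x => ary.count x)]
  have hmain := lc611_main (PySem.Dict.counter ary).keys (fun x => ary.count x) hnd hpos
    (lcTriples (PySem.Dict.counter ary).keys.length) [] (by simp)
  simp only [List.filter_nil, List.map_nil, List.nil_append] at hmain
  rw [hmain, ← lc611_B_eq_filterMap]
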